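-- pv_equiv track=rewrite | github.com/watksimo/advent-of-code | 2021/day-12/python/day12.py | split_path_list
-- ===== SOURCE A (Python) =====
-- def split_path_list(path_list, start_node):
--     split_path_list = []
--     split_path = []
--     for node in path_list:
--       if node == start_node:
--         if len(split_path) != 0: split_path_list.append(split_path)
--         split_path = [node]
--       else:
--         split_path.append(node)
--     if len(split_path) != 0: split_path_list.append(split_path)
--
--     return split_path_list
-- ===== SOURCE B (Python) =====
-- def split_path_list(path_list, start_node):
--     result = []
--     rest = path_list
--     while rest:
--         if start_node in rest[1:]:
--             k = rest[1:].index(start_node) + 1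
--         else:
--             k = len(rest)
--         result.append(rest[:k])
--         rest = rest[k:]
--     return result
-- ===== Notes on version B (the rewrite author's own statement) =====
-- stated objective: alternative
-- what changed: Replaces A's single accumulating pass with two-level state (result list + current group) by a cut-point loop: repeatedly locate the next boundary occurrence of start_node after the current position and slice the segment off in one step; no per-element group building and no empty-group filtering is needed.
import Mathlib
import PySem

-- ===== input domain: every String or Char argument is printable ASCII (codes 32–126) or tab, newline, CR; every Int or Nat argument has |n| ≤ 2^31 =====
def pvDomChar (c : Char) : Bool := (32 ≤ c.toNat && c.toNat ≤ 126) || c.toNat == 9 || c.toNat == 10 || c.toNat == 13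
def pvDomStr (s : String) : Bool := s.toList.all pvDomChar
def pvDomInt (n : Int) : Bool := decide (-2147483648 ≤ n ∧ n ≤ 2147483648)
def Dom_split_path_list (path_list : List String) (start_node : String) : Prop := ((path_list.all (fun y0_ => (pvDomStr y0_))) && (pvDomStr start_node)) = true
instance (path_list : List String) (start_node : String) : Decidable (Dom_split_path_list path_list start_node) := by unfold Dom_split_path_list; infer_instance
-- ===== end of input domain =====

-- B replaces A's single accumulating pass (result list + growing current group) by a
-- cut-point loop that finds the next boundary occurrence of start_node and slices
-- whole segments off at once; same cost, different decomposition.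


-- ===== PORT A =====
-- literal port of A: one fold carrying (split_path_list, split_path), flushed at the end
def split_path_list (path_list : List String) (start_node : String) : List (List String) :=
  let s := path_list.foldl
    (fun (s : List (List String) × List String) node =>
      if node == start_node then
        ((if s.2.length ≠ 0 then s.1 ++ [s.2] else s.1), [node])
      else
        (s.1, s.2 ++ [node]))
    ([], [])
  if s.2.length ≠ 0 then s.1 ++ [s.2] else s.1

-- ===== PORT B =====
-- Source B's while loop: on nonempty rest = x :: tail, `start_node in rest[1:]` /
-- `rest[1:].index(start_node)` is PySem.List.index? tail start_node; then with
-- k = k0 + 1 the nonnegative in-range slices rest[:k] and rest[k:] are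
-- x :: tail.take k0 and tail.drop k0 (and rest[:len(rest)] = rest, rest[len(rest):] = []).
def splitAltGo (sn : String) : List String → List (List String)
  | [] => []
  | x :: tail =>
    match PySem.List.index? tail sn with
    | none => [x :: tail]
    | some k0 => (x :: tail.take k0) :: splitAltGo sn (tail.drop k0)
termination_by l => l.length
decreasing_by simp

def split_path_list_alt (path_list : List String) (start_node : String) : List (List String) :=
  splitAltGo start_node path_list

-- ===== PRECONDITION & SPEC =====
def Spec_split_path_list (path_list : List String) (start_node : String) (out : List (List String)) : Prop := out = split_path_list_alt path_list start_node
instance (path_list : List String) (start_node : String) (out : List (List String)) : Decidable (Spec_split_path_list path_list start_node out) := by unfold Spec_split_path_list; infer_instance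

-- ===== CLAIM (what is proved, stated in full; the proofs are below) =====
def Claim_equal_split_path_list : Prop := ∀ (path_list : List String) (start_node : String), Dom_split_path_list path_list start_node → Spec_split_path_list path_list start_node (split_path_list path_list start_node)

-- ===== LEMMAS AND PROOFS =====

-- unfolding equations for B's well-founded recursion
theorem splitAltGo_nil (sn : String) : splitAltGo sn [] = [] := by
  rw [splitAltGo]

theorem splitAltGo_cons (sn x : String) (t : List String) :
    splitAltGo sn (x :: t) =
      match PySem.List.index? t sn with
      | none => [x :: t]
      | some k0 => (x :: t.take k0) :: splitAltGo sn (t.drop k0) := by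
  rw [splitAltGo]

-- A's loop, rewritten as structural recursion on the remaining input with the
-- current group `cur` as the only state (the finished groups are emitted in front).
def goA (sn : String) (cur : List String) : List String → List (List String)
  | [] => if cur.length ≠ 0 then [cur] else []
  | x :: xs =>
    if x == sn then
      (if cur.length ≠ 0 then cur :: goA sn [x] xs else goA sn [x] xs)
    else goA sn (cur ++ [x]) xs

theorem goA_eq_foldl (sn : String) (l : List String) :
    ∀ (acc : List (List String)) (cur : List String),
      (let s := l.foldl
        (fun (s : List (List String) × List String) node =>
          if node == sn then
            ((if s.2.length ≠ 0 then s.1 ++ [s.2] else s.1), [node])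
          else
            (s.1, s.2 ++ [node]))
        (acc, cur)
       if s.2.length ≠ 0 then s.1 ++ [s.2] else s.1) = acc ++ goA sn cur l := by
  induction l with
  | nil =>
    intro acc cur
    simp only [List.foldl_nil, goA]
    split <;> simp
  | cons x xs ih =>
    intro acc cur
    simp only [List.foldl_cons, goA]
    by_cases hx : x == sn
    · simp only [hx, if_pos, ih]
      by_cases hc : cur.length ≠ 0 <;> simp [hc]
    · simp only [hx, Bool.false_eq_true, ih]
      simp

-- the key bridge: a started (nonempty) group `cur` together with the rest `xs`
-- produces exactly `cur`-extended-to-the-next-cut followed by B's segments.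
theorem goA_eq_cut (sn : String) (xs : List String) :
    ∀ (cur : List String), cur ≠ [] →
      goA sn cur xs =
        match PySem.List.index? xs sn with
        | none => [cur ++ xs]
        | some k => (cur ++ xs.take k) :: splitAltGo sn (xs.drop k) := by
  induction xs with
  | nil =>
    intro cur hc
    simp [goA, PySem.List.index?, List.length_eq_zero_iff, hc]
  | cons x t ih =>
    intro cur hc
    by_cases hx : x = sn
    · have h0 : PySem.List.index? (x :: t) sn = some 0 := by
        rw [hx]; exact PySem.List.index?_cons_self sn t
      have hxb : (x == sn) = true := by simpa using hx
      have hlen : cur.length ≠ 0 := by simpa [List.length_eq_zero_iff] using hc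
      have hrec : goA sn [x] t = splitAltGo sn (x :: t) := by
        rw [ih [x] (by simp), splitAltGo_cons]
        cases PySem.List.index? t sn <;> simp
      rw [h0]
      simp [goA, hxb, hlen, hrec]
    · have hne : x ≠ sn := hx
      have hxb : (x == sn) = false := by simpa using hx
      have hcons : PySem.List.index? (x :: t) sn =
          (PySem.List.index? t sn).map (· + 1) :=
        PySem.List.index?_cons_of_ne t hne
      rw [hcons]
      simp only [goA, hxb, Bool.false_eq_true, if_neg, not_false_eq_true]
      rw [ih (cur ++ [x]) (by simp)]
      cases hind : PySem.List.index? t sn with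
      | none => simp
      | some k0 => simp

theorem goA_nil_start (sn : String) (l : List String) :
    goA sn [] l = splitAltGo sn l := by
  cases l with
  | nil => simp [goA, splitAltGo_nil]
  | cons x t =>
    have hrec : goA sn [x] t = splitAltGo sn (x :: t) := by
      rw [goA_eq_cut sn t [x] (by simp), splitAltGo_cons]
      cases PySem.List.index? t sn <;> simp
    by_cases hx : x == sn
    · simp [goA, hx, hrec]
    · simp [goA, hx, hrec]

-- ===== VERDICT (by name: the statement is the Claim_ definition above) =====
theorem split_path_list_spec : Claim_equal_split_path_list := by
  intro path_list start_node _
  unfold Spec_split_path_list split_path_list split_path_list_alt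
  have h := goA_eq_foldl start_node path_list [] []
  simpa [goA_nil_start] using h
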